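-- pv_equiv track=rewrite | github.com/athavan5/games | elevens_card.py | is_11_possible
-- ===== SOURCE A (Python) =====
-- def point_system(strCard):
--     if strCard == "AD" or strCard == "AC" or strCard == "AH" or strCard == "AS":
--         return 1
--     elif strCard == "2D" or strCard == "2C" or strCard == "2H" or strCard == "2S":
--         return 2
--     elif strCard == "3D" or strCard == "3C" or strCard == "3H" or strCard == "3S":
--         return 3
--     elif strCard == "4D" or strCard == "4C" or strCard == "4H" or strCard == "4S":
--         return 4
--     elif strCard == "5D" or strCard == "5C" or strCard == "5H" or strCard == "5S":
--         return 5
--     elif strCard == "6D" or strCard == "6C" or strCard == "6H" or strCard == "6S":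
--         return 6
--     elif strCard == "7D" or strCard == "7C" or strCard == "7H" or strCard == "7S":
--         return 7
--     elif strCard == "8D" or strCard == "8C" or strCard == "8H" or strCard == "8S":
--         return 8
--     elif strCard == "9D" or strCard == "9C" or strCard == "9H" or strCard == "9S":
--         return 9
--     elif strCard == "10D" or strCard == "10C" or strCard == "10H" or strCard == "10S":
--         return 10
--
--     return 0
--
-- def is_11_possible(arr):
--
--     for i in range(len(arr)):
--         for j in range(1, len(arr)):
--             if point_system(arr[i]) + point_system(arr[j]) == 11:
--                 return True
--
--     for a in range(len(arr)):
--         for b in range(1, len(arr)):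
--             for c in range(2, len(arr)):
--                 s1 = arr[a]
--                 s2 = arr[b]
--                 s3 = arr[c]
--
--                 if s1[:1] == "J" and s2[:1] == "Q" and s3[:1] == "K":
--                     return True
--                 elif s1[:1] == "J" and s2[:1] == "K" and s3[:1] == "Q":
--                     return True
--                 elif s1[:1] == "Q" and s2[:1] == "J" and s3[:1] == "K":
--                     return True
--                 elif s1[:1] == "Q" and s2[:1]== "K" and s3[:1] == "J":
--                     return True
--                 elif s1[:1] == "K" and s2[:1] == "Q" and s3[:1] == "J":
--                     return True
--                 elif s1[:1] == "K" and s2[:1] == "J" and s3[:1] == "Q":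
--                     return True
-- ===== SOURCE B (Python) =====
-- _PTS = {rank + suit: val
--         for val, rank in enumerate(["A", "2", "3", "4", "5", "6", "7", "8", "9", "10"], start=1)
--         for suit in "DCHS"}
--
--
-- def is_11_possible(arr):
--     vals = {_PTS.get(card, 0) for card in arr}
--     firsts = {card[:1] for card in arr}
--     if any(11 - p in vals for p in vals) or {"J", "Q", "K"} <= firsts:
--         return True
-- ===== Notes on version B (the rewrite author's own statement) =====
-- stated objective: faster
-- what changed: Replaced A's nested O(n^3) index loops (all pairs for the sum-11 test, all triples for the J/Q/K test) by a single pass that builds the set of point values and the set of first letters, then checks for a complement-11 pair in the value set and for {J,Q,K} being a subset of the letter set.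
import Mathlib
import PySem

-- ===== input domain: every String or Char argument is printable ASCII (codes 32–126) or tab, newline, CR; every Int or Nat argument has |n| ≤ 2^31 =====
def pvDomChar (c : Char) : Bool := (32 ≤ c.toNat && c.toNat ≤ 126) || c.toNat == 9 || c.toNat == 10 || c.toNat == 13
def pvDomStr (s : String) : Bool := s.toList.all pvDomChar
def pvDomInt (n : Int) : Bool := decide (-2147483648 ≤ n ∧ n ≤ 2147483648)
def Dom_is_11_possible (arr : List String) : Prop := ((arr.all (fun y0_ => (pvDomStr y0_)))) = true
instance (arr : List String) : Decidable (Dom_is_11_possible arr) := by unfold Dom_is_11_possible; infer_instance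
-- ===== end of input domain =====

-- B replaces A's O(n^3) index loops by one pass building the set of point values and of first letters.
-- Equivalence of the RETURN value (some true / none) is proved for all inputs; A is total.

-- ===== PORT A =====
def psA (s : String) : Int :=
  if s = "AD" ∨ s = "AC" ∨ s = "AH" ∨ s = "AS" then 1
  else if s = "2D" ∨ s = "2C" ∨ s = "2H" ∨ s = "2S" then 2
  else if s = "3D" ∨ s = "3C" ∨ s = "3H" ∨ s = "3S" then 3
  else if s = "4D" ∨ s = "4C" ∨ s = "4H" ∨ s = "4S" then 4
  else if s = "5D" ∨ s = "5C" ∨ s = "5H" ∨ s = "5S" then 5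
  else if s = "6D" ∨ s = "6C" ∨ s = "6H" ∨ s = "6S" then 6
  else if s = "7D" ∨ s = "7C" ∨ s = "7H" ∨ s = "7S" then 7
  else if s = "8D" ∨ s = "8C" ∨ s = "8H" ∨ s = "8S" then 8
  else if s = "9D" ∨ s = "9C" ∨ s = "9H" ∨ s = "9S" then 9
  else if s = "10D" ∨ s = "10C" ∨ s = "10H" ∨ s = "10S" then 10
  else 0

-- the elif chain of the triple loop, in source order
def jqkChk (f1 f2 f3 : String) : Bool :=
  (f1 == "J" && f2 == "Q" && f3 == "K") ||
  (f1 == "J" && f2 == "K" && f3 == "Q") ||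
  (f1 == "Q" && f2 == "J" && f3 == "K") ||
  (f1 == "Q" && f2 == "K" && f3 == "J") ||
  (f1 == "K" && f2 == "Q" && f3 == "J") ||
  (f1 == "K" && f2 == "J" && f3 == "Q")

def is_11_possible (arr : List String) : Option Bool :=
  if (PySem.List.pyRange 0 (arr.length : Int) 1).any (fun i =>
      (PySem.List.pyRange 1 (arr.length : Int) 1).any (fun j =>
        psA (PySem.List.pyGetD arr i "") + psA (PySem.List.pyGetD arr j "") == 11)) then
    some true
  else if (PySem.List.pyRange 0 (arr.length : Int) 1).any (fun a =>
      (PySem.List.pyRange 1 (arr.length : Int) 1).any (fun b =>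
        (PySem.List.pyRange 2 (arr.length : Int) 1).any (fun c =>
          jqkChk (PySem.Str.slice (PySem.List.pyGetD arr a "") none (some 1))
                 (PySem.Str.slice (PySem.List.pyGetD arr b "") none (some 1))
                 (PySem.Str.slice (PySem.List.pyGetD arr c "") none (some 1))))) then
    some true
  else none

-- ===== PORT B =====
def ptsB : PySem.Dict String Int :=
  PySem.Dict.ofList
    ((PySem.List.enumerate ["A","2","3","4","5","6","7","8","9","10"] 1).flatMap
      (fun vr => ("DCHS".toList).map (fun su => (vr.2 ++ String.ofList [su], vr.1))))

def is_11_possible_alt (arr : List String) : Option Bool :=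
  let vals : PySem.Set Int := PySem.Set.ofList (arr.map (fun card => PySem.Dict.getD ptsB card 0))
  let firsts : PySem.Set String :=
    PySem.Set.ofList (arr.map (fun card => PySem.Str.slice card none (some 1)))
  if vals.any (fun p => PySem.Set.contains vals (11 - p)) ||
      PySem.Set.issubset (PySem.Set.ofList ["J", "Q", "K"]) firsts then
    some true
  else none

-- ===== PRECONDITION & SPEC =====
def Spec_is_11_possible (arr : List String) (out : Option Bool) : Prop := out = is_11_possible_alt arr
instance (arr : List String) (out : Option Bool) : Decidable (Spec_is_11_possible arr out) := by unfold Spec_is_11_possible; infer_instance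

-- ===== CLAIM (what is proved, stated in full; the proofs are below) =====
def Claim_equal_is_11_possible : Prop := ∀ (arr : List String), Dom_is_11_possible arr → Spec_is_11_possible arr (is_11_possible arr)

-- ===== LEMMAS AND PROOFS =====

set_option maxRecDepth 20000 in
theorem pts_eq (c : String) : PySem.Dict.getD ptsB c 0 = psA c := by
  have h : ptsB = PySem.Dict.mk [("AD",1), ("AC",1), ("AH",1), ("AS",1),
    ("2D",2), ("2C",2), ("2H",2), ("2S",2),
    ("3D",3), ("3C",3), ("3H",3), ("3S",3),
    ("4D",4), ("4C",4), ("4H",4), ("4S",4),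
    ("5D",5), ("5C",5), ("5H",5), ("5S",5),
    ("6D",6), ("6C",6), ("6H",6), ("6S",6),
    ("7D",7), ("7C",7), ("7H",7), ("7S",7),
    ("8D",8), ("8C",8), ("8H",8), ("8S",8),
    ("9D",9), ("9C",9), ("9H",9), ("9S",9),
    ("10D",10), ("10C",10), ("10H",10), ("10S",10)] := by rfl
  rw [h]
  by_cases h1 : c = "AD"
  · subst h1; decide
  by_cases h2 : c = "AC"
  · subst h2; decide
  by_cases h3 : c = "AH"
  · subst h3; decide
  by_cases h4 : c = "AS"
  · subst h4; decide
  by_cases h5 : c = "2D"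
  · subst h5; decide
  by_cases h6 : c = "2C"
  · subst h6; decide
  by_cases h7 : c = "2H"
  · subst h7; decide
  by_cases h8 : c = "2S"
  · subst h8; decide
  by_cases h9 : c = "3D"
  · subst h9; decide
  by_cases h10 : c = "3C"
  · subst h10; decide
  by_cases h11 : c = "3H"
  · subst h11; decide
  by_cases h12 : c = "3S"
  · subst h12; decide
  by_cases h13 : c = "4D"
  · subst h13; decide
  by_cases h14 : c = "4C"
  · subst h14; decide
  by_cases h15 : c = "4H"
  · subst h15; decide
  by_cases h16 : c = "4S"
  · subst h16; decide
  by_cases h17 : c = "5D"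
  · subst h17; decide
  by_cases h18 : c = "5C"
  · subst h18; decide
  by_cases h19 : c = "5H"
  · subst h19; decide
  by_cases h20 : c = "5S"
  · subst h20; decide
  by_cases h21 : c = "6D"
  · subst h21; decide
  by_cases h22 : c = "6C"
  · subst h22; decide
  by_cases h23 : c = "6H"
  · subst h23; decide
  by_cases h24 : c = "6S"
  · subst h24; decide
  by_cases h25 : c = "7D"
  · subst h25; decide
  by_cases h26 : c = "7C"
  · subst h26; decide
  by_cases h27 : c = "7H"
  · subst h27; decide
  by_cases h28 : c = "7S"
  · subst h28; decide
  by_cases h29 : c = "8D"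
  · subst h29; decide
  by_cases h30 : c = "8C"
  · subst h30; decide
  by_cases h31 : c = "8H"
  · subst h31; decide
  by_cases h32 : c = "8S"
  · subst h32; decide
  by_cases h33 : c = "9D"
  · subst h33; decide
  by_cases h34 : c = "9C"
  · subst h34; decide
  by_cases h35 : c = "9H"
  · subst h35; decide
  by_cases h36 : c = "9S"
  · subst h36; decide
  by_cases h37 : c = "10D"
  · subst h37; decide
  by_cases h38 : c = "10C"
  · subst h38; decide
  by_cases h39 : c = "10H"
  · subst h39; decide
  by_cases h40 : c = "10S"
  · subst h40; decide
  simp [psA, PySem.Dict.getD, PySem.Dict.get?, h1, Ne.symm h1, h2, Ne.symm h2, h3, Ne.symm h3, h4, Ne.symm h4, h5, Ne.symm h5, h6, Ne.symm h6, h7, Ne.symm h7, h8, Ne.symm h8, h9, Ne.symm h9, h10, Ne.symm h10, h11, Ne.symm h11, h12, Ne.symm h12, h13, Ne.symm h13, h14, Ne.symm h14, h15, Ne.symm h15, h16, Ne.symm h16, h17, Ne.symm h17, h18, Ne.symm h18, h19, Ne.symm h19, h20, Ne.symm h20, h21, Ne.symm h21, h22, Ne.symm h22, h23, Ne.symm h23,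 h24, Ne.symm h24, h25, Ne.symm h25, h26, Ne.symm h26, h27, Ne.symm h27, h28, Ne.symm h28, h29, Ne.symm h29, h30, Ne.symm h30, h31, Ne.symm h31, h32, Ne.symm h32, h33, Ne.symm h33, h34, Ne.symm h34, h35, Ne.symm h35, h36, Ne.symm h36, h37, Ne.symm h37, h38, Ne.symm h38, h39, Ne.symm h39, h40, Ne.symm h40]

def PairProp (arr : List String) : Prop := ∃ u ∈ arr, ∃ v ∈ arr, psA u + psA v = 11

def TripleProp (arr : List String) : Prop :=
  "J" ∈ arr.map (fun card => PySem.Str.slice card none (some 1)) ∧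
  "Q" ∈ arr.map (fun card => PySem.Str.slice card none (some 1)) ∧
  "K" ∈ arr.map (fun card => PySem.Str.slice card none (some 1))

theorem A_pair_iff (arr : List String) :
    ((PySem.List.pyRange 0 (arr.length : Int) 1).any (fun i =>
      (PySem.List.pyRange 1 (arr.length : Int) 1).any (fun j =>
        psA (PySem.List.pyGetD arr i "") + psA (PySem.List.pyGetD arr j "") == 11)) = true)
    ↔ PairProp arr := by
  simp only [List.any_eq_true, PySem.List.mem_pyRange_one, beq_iff_eq]
  constructor
  · rintro ⟨i, ⟨hi0, hin⟩, j, ⟨hj1, hjn⟩, hsum⟩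
    exact ⟨_, PySem.List.pyGetD_mem arr "" ⟨by omega, hin⟩,
           _, PySem.List.pyGetD_mem arr "" ⟨by omega, hjn⟩, hsum⟩
  · rintro ⟨u, hu, v, hv, hsum⟩
    obtain ⟨iu, hiu, hgu⟩ := List.mem_iff_getElem.1 hu
    obtain ⟨iv, hiv, hgv⟩ := List.mem_iff_getElem.1 hv
    have hne : iu ≠ iv := by
      rintro rfl
      rw [hgu] at hgv; rw [hgv] at hsum; omega
    have key : ∀ (x y : Nat) (hx : x < arr.length) (hy : y < arr.length), x < y →
        psA (arr[x]'hx) + psA (arr[y]'hy) = 11 →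
        ∃ i, (0 ≤ i ∧ i < (arr.length : Int)) ∧ ∃ j, (1 ≤ j ∧ j < (arr.length : Int)) ∧
          psA (PySem.List.pyGetD arr i "") + psA (PySem.List.pyGetD arr j "") = 11 := by
      intro x y hx hy hxy hs
      refine ⟨(x : Int), ⟨by omega, by omega⟩, (y : Int), ⟨by omega, by omega⟩, ?_⟩
      rw [PySem.List.pyGetD_eq_getElem _ _ (by omega) (by omega),
          PySem.List.pyGetD_eq_getElem _ _ (by omega) (by omega)]
      simpa [Int.toNat_natCast] using hs
    rcases Nat.lt_or_ge iu iv with h | h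
    · exact key iu iv hiu hiv h (by rw [hgu, hgv]; exact hsum)
    · have h' : iv < iu := by omega
      exact key iv iu hiv hiu h' (by rw [hgv, hgu]; omega)

theorem A_triple_iff (arr : List String) :
    ((PySem.List.pyRange 0 (arr.length : Int) 1).any (fun a =>
      (PySem.List.pyRange 1 (arr.length : Int) 1).any (fun b =>
        (PySem.List.pyRange 2 (arr.length : Int) 1).any (fun c =>
          jqkChk (PySem.Str.slice (PySem.List.pyGetD arr a "") none (some 1))
                 (PySem.Str.slice (PySem.List.pyGetD arr b "") none (some 1))
                 (PySem.Str.slice (PySem.List.pyGetD arr c "") none (some 1))))) = true)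
    ↔ TripleProp arr := by
  simp only [List.any_eq_true, PySem.List.mem_pyRange_one]
  constructor
  · rintro ⟨a, ⟨ha0, han⟩, b, ⟨hb1, hbn⟩, c, ⟨hc2, hcn⟩, hM⟩
    have hma := PySem.List.pyGetD_mem arr "" (i := a) ⟨by omega, han⟩
    have hmb := PySem.List.pyGetD_mem arr "" (i := b) ⟨by omega, hbn⟩
    have hmc := PySem.List.pyGetD_mem arr "" (i := c) ⟨by omega, hcn⟩
    simp only [jqkChk, Bool.or_eq_true, Bool.and_eq_true, beq_iff_eq] at hM
    unfold TripleProp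
    rcases hM with ((((⟨⟨h1, h2⟩, h3⟩ | ⟨⟨h1, h2⟩, h3⟩) | ⟨⟨h1, h2⟩, h3⟩) | ⟨⟨h1, h2⟩, h3⟩) | ⟨⟨h1, h2⟩, h3⟩) | ⟨⟨h1, h2⟩, h3⟩
    · exact ⟨List.mem_map.2 ⟨_, hma, h1⟩, List.mem_map.2 ⟨_, hmb, h2⟩, List.mem_map.2 ⟨_, hmc, h3⟩⟩
    · exact ⟨List.mem_map.2 ⟨_, hma, h1⟩, List.mem_map.2 ⟨_, hmc, h3⟩, List.mem_map.2 ⟨_, hmb, h2⟩⟩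
    · exact ⟨List.mem_map.2 ⟨_, hmb, h2⟩, List.mem_map.2 ⟨_, hma, h1⟩, List.mem_map.2 ⟨_, hmc, h3⟩⟩
    · exact ⟨List.mem_map.2 ⟨_, hmc, h3⟩, List.mem_map.2 ⟨_, hma, h1⟩, List.mem_map.2 ⟨_, hmb, h2⟩⟩
    · exact ⟨List.mem_map.2 ⟨_, hmc, h3⟩, List.mem_map.2 ⟨_, hmb, h2⟩, List.mem_map.2 ⟨_, hma, h1⟩⟩
    · exact ⟨List.mem_map.2 ⟨_, hmb, h2⟩, List.mem_map.2 ⟨_, hmc, h3⟩, List.mem_map.2 ⟨_, hma, h1⟩⟩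
  · rintro ⟨hJ, hQ, hK⟩
    obtain ⟨uJ, huJ, hfJ'⟩ := List.mem_map.1 hJ
    obtain ⟨uQ, huQ, hfQ'⟩ := List.mem_map.1 hQ
    obtain ⟨uK, huK, hfK'⟩ := List.mem_map.1 hK
    replace hfJ : PySem.Str.slice uJ none (some 1) = "J" := hfJ'
    replace hfQ : PySem.Str.slice uQ none (some 1) = "Q" := hfQ'
    replace hfK : PySem.Str.slice uK none (some 1) = "K" := hfK'
    obtain ⟨iJ, hiJ, hgJ⟩ := List.mem_iff_getElem.1 huJ
    obtain ⟨iQ, hiQ, hgQ⟩ := List.mem_iff_getElem.1 huQ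
    obtain ⟨iK, hiK, hgK⟩ := List.mem_iff_getElem.1 huK
    have dJQ : iJ ≠ iQ := by
      rintro rfl; rw [hgJ] at hgQ; rw [← hgQ] at hfQ
      exact absurd (hfJ.symm.trans hfQ) (by decide)
    have dJK : iJ ≠ iK := by
      rintro rfl; rw [hgJ] at hgK; rw [← hgK] at hfK
      exact absurd (hfJ.symm.trans hfK) (by decide)
    have dQK : iQ ≠ iK := by
      rintro rfl; rw [hgQ] at hgK; rw [← hgK] at hfK
      exact absurd (hfQ.symm.trans hfK) (by decide)
    have key : ∀ (x y z : Nat) (hx : x < arr.length) (hy : y < arr.length) (hz : z < arr.length),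
        x < y → y < z →
        jqkChk (PySem.Str.slice (arr[x]'hx) none (some 1)) (PySem.Str.slice (arr[y]'hy) none (some 1))
               (PySem.Str.slice (arr[z]'hz) none (some 1)) = true →
        ∃ a, (0 ≤ a ∧ a < (arr.length : Int)) ∧ ∃ b, (1 ≤ b ∧ b < (arr.length : Int)) ∧
          ∃ c, (2 ≤ c ∧ c < (arr.length : Int)) ∧
            jqkChk (PySem.Str.slice (PySem.List.pyGetD arr a "") none (some 1))
                   (PySem.Str.slice (PySem.List.pyGetD arr b "") none (some 1))
                   (PySem.Str.slice (PySem.List.pyGetD arr c "") none (some 1)) = true := by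
      intro x y z hx hy hz hxy hyz hchk
      refine ⟨(x : Int), ⟨by omega, by omega⟩, (y : Int), ⟨by omega, by omega⟩,
              (z : Int), ⟨by omega, by omega⟩, ?_⟩
      rw [PySem.List.pyGetD_eq_getElem _ _ (by omega) (by omega),
          PySem.List.pyGetD_eq_getElem _ _ (by omega) (by omega),
          PySem.List.pyGetD_eq_getElem _ _ (by omega) (by omega)]
      simpa [Int.toNat_natCast] using hchk
    rcases Nat.lt_trichotomy iJ iQ with hJQ | hJQ | hJQ
    · rcases Nat.lt_trichotomy iK iJ with hKx | hKx | hKx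
      · exact key iK iJ iQ hiK hiJ hiQ hKx hJQ
          (by rw [hgK, hgJ, hgQ, hfK, hfJ, hfQ]; decide)
      · exact absurd hKx.symm dJK
      · rcases Nat.lt_trichotomy iK iQ with hKy | hKy | hKy
        · exact key iJ iK iQ hiJ hiK hiQ hKx hKy
            (by rw [hgJ, hgK, hgQ, hfJ, hfK, hfQ]; decide)
        · exact absurd hKy dQK.symm.elim
        · exact key iJ iQ iK hiJ hiQ hiK hJQ hKy
            (by rw [hgJ, hgQ, hgK, hfJ, hfQ, hfK]; decide)
    · exact absurd hJQ dJQ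
    · rcases Nat.lt_trichotomy iK iQ with hKx | hKx | hKx
      · exact key iK iQ iJ hiK hiQ hiJ hKx hJQ
          (by rw [hgK, hgQ, hgJ, hfK, hfQ, hfJ]; decide)
      · exact absurd hKx.symm dQK
      · rcases Nat.lt_trichotomy iK iJ with hKy | hKy | hKy
        · exact key iQ iK iJ hiQ hiK hiJ hKx hKy
            (by rw [hgQ, hgK, hgJ, hfQ, hfK, hfJ]; decide)
        · exact absurd hKy dJK.symm.elim
        · exact key iQ iJ iK hiQ hiJ hiK hJQ hKy
            (by rw [hgQ, hgJ, hgK, hfQ, hfJ, hfK]; decide)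

theorem B_cond_iff (arr : List String) :
    (((PySem.Set.ofList (arr.map (fun card => PySem.Dict.getD ptsB card 0))).any (fun p =>
        PySem.Set.contains (PySem.Set.ofList (arr.map (fun card => PySem.Dict.getD ptsB card 0))) (11 - p)) ||
      PySem.Set.issubset (PySem.Set.ofList ["J", "Q", "K"])
        (PySem.Set.ofList (arr.map (fun card => PySem.Str.slice card none (some 1))))) = true)
    ↔ (PairProp arr ∨ TripleProp arr) := by
  simp only [Bool.or_eq_true, List.any_eq_true, PySem.Set.contains_iff, PySem.Set.mem_ofList,
    PySem.Set.issubset_iff, pts_eq, List.forall_mem_cons]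
  constructor
  · rintro (⟨p, hp, hc⟩ | ⟨hJ, hQ, hK, -⟩)
    · obtain ⟨u, hu, hup⟩ := List.mem_map.1 hp
      obtain ⟨v, hv, hvp⟩ := List.mem_map.1 hc
      exact Or.inl ⟨u, hu, v, hv, by omega⟩
    · exact Or.inr ⟨hJ, hQ, hK⟩
  · rintro (⟨u, hu, v, hv, hsum⟩ | ⟨hJ, hQ, hK⟩)
    · refine Or.inl ⟨psA u, List.mem_map.2 ⟨u, hu, rfl⟩, List.mem_map.2 ⟨v, hv, by omega⟩⟩
    · exact Or.inr ⟨hJ, hQ, hK, by simp⟩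

-- ===== VERDICT (by name: the statement is the Claim_ definition above) =====
theorem is_11_possible_spec : Claim_equal_is_11_possible := by
  intro arr _
  unfold Spec_is_11_possible is_11_possible is_11_possible_alt
  by_cases h1 : ((PySem.List.pyRange 0 (arr.length : Int) 1).any (fun i =>
      (PySem.List.pyRange 1 (arr.length : Int) 1).any (fun j =>
        psA (PySem.List.pyGetD arr i "") + psA (PySem.List.pyGetD arr j "") == 11)) = true)
  · rw [if_pos h1, if_pos]
    exact (B_cond_iff arr).2 (Or.inl ((A_pair_iff arr).1 h1))
  · rw [if_neg h1]
    by_cases h2 : ((PySem.List.pyRange 0 (arr.length : Int) 1).any (fun a =>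
        (PySem.List.pyRange 1 (arr.length : Int) 1).any (fun b =>
          (PySem.List.pyRange 2 (arr.length : Int) 1).any (fun c =>
            jqkChk (PySem.Str.slice (PySem.List.pyGetD arr a "") none (some 1))
                   (PySem.Str.slice (PySem.List.pyGetD arr b "") none (some 1))
                   (PySem.Str.slice (PySem.List.pyGetD arr c "") none (some 1))))) = true)
    · rw [if_pos h2, if_pos]
      exact (B_cond_iff arr).2 (Or.inr ((A_triple_iff arr).1 h2))
    · rw [if_neg h2, if_neg]
      intro hB
      rcases (B_cond_iff arr).1 hB with hP | hT
      · exact h1 ((A_pair_iff arr).2 hP)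
      · exact h2 ((A_triple_iff arr).2 hT)
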